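-- pv_equiv track=rewrite | github.com/sanger-tol/gda | feature_extraction/validate_nextflow_config.py | remove_trace_field
-- ===== SOURCE A (Python) =====
-- def remove_trace_field(config_data):
--     """
--     Input: Nextflow config file loaded as a list of strings
--     Output: A list that is like the input list but without the lines that define the Nextflow trace variable, as
--         this part of the config file does not need to be checked in the same way as the rest of the file
--     """
--     out_list = list()
--     trace_line_flag = False
--     for line in config_data:
--         if line == "trace {":
--             trace_line_flag = True
--         if trace_line_flag == False:
--             out_list.append(line)
--         if line == "}":
--             trace_line_flag = False
--     return out_list
-- ===== SOURCE B (Python) =====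
-- def remove_trace_field(config_data):
--     out_list = []
--     i = 0
--     n = len(config_data)
--     while i < n:
--         if config_data[i] == "trace {":
--             i += 1
--             while i < n and config_data[i] != "}":
--                 i += 1
--             i += 1  # skip the closing "}" (or move past end)
--         else:
--             out_list.append(config_data[i])
--             i += 1
--     return out_list
-- ===== Notes on version B (the rewrite author's own statement) =====
-- stated objective: simpler
-- what changed: Replaced the per-line boolean state flag with a flat index-based block-skip: on 'trace {' an inner loop jumps past the whole block up to and including the next '}', so no flag is threaded through the pass.
import Mathlib
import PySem

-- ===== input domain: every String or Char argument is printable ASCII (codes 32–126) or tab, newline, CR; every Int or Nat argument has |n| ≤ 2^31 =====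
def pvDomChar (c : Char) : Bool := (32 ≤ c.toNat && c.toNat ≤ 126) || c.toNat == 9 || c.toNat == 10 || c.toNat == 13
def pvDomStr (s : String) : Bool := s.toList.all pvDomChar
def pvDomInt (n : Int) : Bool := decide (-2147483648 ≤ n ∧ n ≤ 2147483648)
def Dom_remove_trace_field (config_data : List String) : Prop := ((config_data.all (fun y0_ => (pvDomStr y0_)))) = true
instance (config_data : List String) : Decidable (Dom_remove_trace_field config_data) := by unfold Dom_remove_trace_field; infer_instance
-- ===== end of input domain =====

-- B replaces A's per-line boolean state flag with a flat index-free block-skip (simpler decomposition; same O(n) cost).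

-- ===== PORT A =====
-- One step of A's for-loop over (out_list, trace_line_flag).
def rtfStepA (s : List String × Bool) (line : String) : List String × Bool :=
  let flag := if line == "trace {" then true else s.2
  let out := if flag == false then s.1 ++ [line] else s.1
  let flag := if line == "}" then false else flag
  (out, flag)

def remove_trace_field (config_data : List String) : List String :=
  (config_data.foldl rtfStepA ([], false)).1

-- ===== PORT B =====
-- B's inner while-loop: skip lines up to and including the next "}".
def rtfSkip : List String → List String
  | [] => []
  | l :: ls => if l == "}" then ls else rtfSkip ls

theorem rtfSkip_length_le : ∀ (ls : List String), (rtfSkip ls).length ≤ ls.length := by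
  intro ls
  induction ls with
  | nil => simp [rtfSkip]
  | cons l ls ih =>
    simp only [rtfSkip]
    split
    · exact Nat.le_succ _
    · exact Nat.le_succ_of_le ih

-- B's outer while-loop: copy lines, jumping over each "trace {" block.
def remove_trace_field_alt : List String → List String
  | [] => []
  | l :: ls =>
    if l == "trace {" then remove_trace_field_alt (rtfSkip ls)
    else l :: remove_trace_field_alt ls
termination_by ls => ls.length
decreasing_by
  · exact Nat.lt_succ_of_le (rtfSkip_length_le ls)
  · simp

-- ===== PRECONDITION & SPEC =====
def Spec_remove_trace_field (config_data : List String) (out : List String) : Prop := out = remove_trace_field_alt config_data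
instance (config_data : List String) (out : List String) : Decidable (Spec_remove_trace_field config_data out) := by unfold Spec_remove_trace_field; infer_instance

-- ===== CLAIM (what is proved, stated in full; the proofs are below) =====
def Claim_equal_remove_trace_field : Prop := ∀ (config_data : List String), Dom_remove_trace_field config_data → Spec_remove_trace_field config_data (remove_trace_field config_data)

-- ===== LEMMAS AND PROOFS =====

-- A's loop started with flag = true behaves like B after skipping the block;
-- started with flag = false it appends acc to B's output.
theorem rtf_loop_eq : ∀ (ls : List String) (acc : List String),
    (ls.foldl rtfStepA (acc, false)).1 = acc ++ remove_trace_field_alt ls ∧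
    (ls.foldl rtfStepA (acc, true)).1 = acc ++ remove_trace_field_alt (rtfSkip ls) := by
  intro ls
  induction ls with
  | nil => intro acc; simp [remove_trace_field_alt, rtfSkip]
  | cons l ls ih =>
    intro acc
    constructor
    · by_cases ht : l = "trace {"
      · subst ht
        simp only [List.foldl_cons, rtfStepA, remove_trace_field_alt]
        norm_num
        exact (ih acc).2
      · simp only [List.foldl_cons, rtfStepA, remove_trace_field_alt, beq_iff_eq, if_neg ht]
        by_cases hc : l = "}"
        · subst hc; simpa using (ih (acc ++ ["}"])).1
        · simp only [if_neg hc]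
          simpa using (ih (acc ++ [l])).1
    · simp only [List.foldl_cons, rtfStepA, rtfSkip, beq_iff_eq]
      by_cases hc : l = "}"
      · subst hc
        norm_num
        exact (ih acc).1
      · simp only [if_neg hc]
        have : (if l = "trace {" then true else true) = true := by split <;> rfl
        simp only [this]
        simpa using (ih acc).2

-- ===== VERDICT (by name: the statement is the Claim_ definition above) =====
theorem remove_trace_field_spec : Claim_equal_remove_trace_field := by
  intro config_data _
  unfold Spec_remove_trace_field remove_trace_field
  simpa using (rtf_loop_eq config_data []).1
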